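-- pv_equiv track=rewrite | github.com/Amirul-Islam-Papon/Operating-System | fcfs_disk_scheduling.py | fcfs_disk_scheduling
-- ===== SOURCE A (Python) =====
-- def fcfs_disk_scheduling(requests, head):
--     total_seek_time = 0
--     sequence = [head]
--
--     for request in requests:
--         seek_distance = abs(request - head)
--         total_seek_time += seek_distance
--         head = request
--         sequence.append(head)
--
--     return total_seek_time, sequence
-- ===== SOURCE B (Python) =====
-- def fcfs_disk_scheduling(requests, head):
--     requests = list(requests)
--
--     def solve(pos, segment):
--         # (seek cost, visit sequence) for serving `segment` starting at `pos`
--         if not segment: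
--             return 0, [pos]
--         if len(segment) == 1:
--             return abs(segment[0] - pos), [pos, segment[0]]
--         mid = len(segment) // 2
--         left, right = segment[:mid], segment[mid:]
--         t1, s1 = solve(pos, left)
--         t2, s2 = solve(left[-1], right)
--         return t1 + t2, s1 + s2[1:]
--
--     return solve(head, requests)
-- ===== Notes on version B (the rewrite author's own statement) =====
-- stated objective: alternative
-- what changed: B replaces A's single left-to-right accumulator loop with a divide-and-conquer recursion that splits the request segment in half, solves each half independently (the right half starting from the left half's last request), and merges the costs and sequences.
import Mathlib
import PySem

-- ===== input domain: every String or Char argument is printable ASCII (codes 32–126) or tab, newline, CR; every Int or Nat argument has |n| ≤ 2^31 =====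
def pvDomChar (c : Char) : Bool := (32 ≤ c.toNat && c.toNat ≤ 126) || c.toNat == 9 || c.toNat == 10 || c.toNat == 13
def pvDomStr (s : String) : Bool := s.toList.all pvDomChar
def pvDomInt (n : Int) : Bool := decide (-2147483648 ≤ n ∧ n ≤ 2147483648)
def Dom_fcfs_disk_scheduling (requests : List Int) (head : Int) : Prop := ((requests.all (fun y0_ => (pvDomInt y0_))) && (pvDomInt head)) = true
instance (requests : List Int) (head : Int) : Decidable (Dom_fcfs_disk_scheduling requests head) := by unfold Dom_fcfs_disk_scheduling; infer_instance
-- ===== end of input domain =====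

-- B serves the requests by divide and conquer (split the segment in half, solve halves, merge cost and sequence) instead of A's single left-to-right accumulator loop; same return value.


-- ===== PORT A =====
-- loop state: (total_seek_time, head, sequence), updated exactly as A's loop body does
def fcfsStepA (st : Int × Int × List Int) (request : Int) : Int × Int × List Int :=
  (st.1 + |request - st.2.1|, request, st.2.2 ++ [request])

def fcfs_disk_scheduling (requests : List Int) (head : Int) : Int × List Int :=
  let st := requests.foldl fcfsStepA (0, head, [head])
  (st.1, st.2.2)

-- ===== PORT B =====
-- solve(pos, segment): divide and conquer over the segment, exactly as Source B's `solve`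
def fcfsSolve (pos : Int) (segment : List Int) : Int × List Int :=
  match segment with
  | [] => (0, [pos])
  | [r] => (|r - pos|, [pos, r])
  | a :: b :: rest =>
    let seg := a :: b :: rest
    let mid := seg.length / 2
    let left := seg.take mid
    let right := seg.drop mid
    let p1 := fcfsSolve pos left
    let p2 := fcfsSolve left.getLast! right
    (p1.1 + p2.1, p1.2 ++ p2.2.tail)
termination_by segment.length
decreasing_by
  · simp [List.length_take]; omega
  · simp; omega

def fcfs_disk_scheduling_alt (requests : List Int) (head : Int) : Int × List Int :=
  fcfsSolve head requests

-- ===== PRECONDITION & SPEC =====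
def Spec_fcfs_disk_scheduling (requests : List Int) (head : Int) (out : Int × List Int) : Prop := out = fcfs_disk_scheduling_alt requests head
instance (requests : List Int) (head : Int) (out : Int × List Int) : Decidable (Spec_fcfs_disk_scheduling requests head out) := by unfold Spec_fcfs_disk_scheduling; infer_instance

-- ===== CLAIM (what is proved, stated in full; the proofs are below) =====
def Claim_equal_fcfs_disk_scheduling : Prop := ∀ (requests : List Int) (head : Int), Dom_fcfs_disk_scheduling requests head → Spec_fcfs_disk_scheduling requests head (fcfs_disk_scheduling requests head)

-- ===== LEMMAS AND PROOFS =====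
-- proof-side reference function: total seek cost of serving the list from `pos`
def fcfsCost (pos : Int) : List Int → Int
  | [] => 0
  | r :: rs => |r - pos| + fcfsCost r rs

lemma getLast_bang_cons_cons (x y : Int) (l : List Int) : (x :: y :: l).getLast! = (y :: l).getLast! := by
  induction l generalizing y with
  | nil => rfl
  | cons z l ih => exact ih z

lemma fcfsCost_append (l : List Int) : ∀ (pos : Int) (r : List Int), l ≠ [] →
    fcfsCost pos (l ++ r) = fcfsCost pos l + fcfsCost l.getLast! r := by
  induction l with
  | nil => intro _ _ h; exact absurd rfl h
  | cons x l' ih =>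
    intro pos r _
    cases l' with
    | nil => simp [fcfsCost, List.getLast!]
    | cons y l'' =>
      have hlast : (x :: y :: l'').getLast! = (y :: l'').getLast! := getLast_bang_cons_cons x y l''
      have h1 : fcfsCost pos ((x :: y :: l'') ++ r) = |x - pos| + fcfsCost x ((y :: l'') ++ r) := rfl
      have h2 : fcfsCost pos (x :: y :: l'') = |x - pos| + fcfsCost x (y :: l'') := rfl
      rw [h1, h2, ih x r (by simp), hlast, add_assoc]

lemma fcfsSolve_eq (pos : Int) (seg : List Int) :
    fcfsSolve pos seg = (fcfsCost pos seg, pos :: seg) := by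
  fun_induction fcfsSolve pos seg with
  | case1 pos => simp [fcfsCost]
  | case2 pos r => simp [fcfsCost]
  | case3 pos a b rest seg mid left right p1 p2 ih1 ih2 =>
    simp only [seg, mid, left, right, p1, p2] at ih1 ih2 ⊢
    rw [ih1, ih2]
    have hleft : (a :: b :: rest).take ((a :: b :: rest).length / 2) ≠ [] := by simp
    have hsplit : (a :: b :: rest).take ((a :: b :: rest).length / 2) ++
        (a :: b :: rest).drop ((a :: b :: rest).length / 2) = a :: b :: rest :=
      List.take_append_drop _ _
    dsimp only
    simp only [Prod.mk.injEq]
    refine ⟨?_, ?_⟩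
    · rw [← fcfsCost_append _ pos _ hleft, hsplit]
    · rw [List.tail_cons, List.cons_append, hsplit]

lemma fcfs_fold_lemma (reqs : List Int) : ∀ (t h : Int) (seq : List Int),
    ((reqs.foldl fcfsStepA (t, h, seq)).1, (reqs.foldl fcfsStepA (t, h, seq)).2.2) =
    (t + fcfsCost h reqs, seq ++ reqs) := by
  induction reqs with
  | nil => intro t h seq; simp [fcfsCost]
  | cons r rs ih =>
    intro t h seq
    simp only [List.foldl_cons, fcfsStepA, fcfsCost]
    rw [ih]
    simp [add_assoc]

-- ===== VERDICT (by name: the statement is the Claim_ definition above) =====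
theorem fcfs_disk_scheduling_spec : Claim_equal_fcfs_disk_scheduling := by
  intro requests head _
  show _ = _
  unfold fcfs_disk_scheduling fcfs_disk_scheduling_alt
  rw [fcfsSolve_eq]
  have h := fcfs_fold_lemma requests 0 head [head]
  rw [Prod.ext_iff] at h
  exact Prod.ext (by simpa using h.1) (by simpa using h.2)
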